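-- pv_equiv track=rewrite | github.com/iamBOBERTBOBERTS/hackingtool | hackingtool.py | _recommend_task_from_text
-- ===== SOURCE A (Python) =====
-- _RECOMMENDATIONS = {
--     "scan a network":           ["scanner", "port-scanner"],
--     "find subdomains":          ["recon"],
--     "scan for vulnerabilities": ["scanner", "web"],
--     "crack passwords":          ["bruteforce", "credentials"],
--     "find leaked secrets":      ["credentials"],
--     "phishing campaign":        ["social-engineering"],
--     "post exploitation":        ["c2", "privesc"],
--     "pivot through network":    ["network"],
--     "pentest active directory": ["active-directory"],
--     "pentest web application":  ["web", "scanner"],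
--     "pentest cloud":            ["cloud"],
--     "pentest mobile app":       ["mobile"],
--     "reverse engineer binary":  ["reversing"],
--     "capture wifi handshake":   ["wireless"],
--     "intercept http traffic":   ["web", "network"],
--     "forensic analysis":        ["forensics"],
--     "ddos testing":             ["ddos"],
--     "create payloads":          ["payload"],
--     "find xss vulnerabilities": ["web"],
--     "brute force directories":  ["bruteforce", "web"],
--     "osint / recon a target":   ["osint", "recon"],
--     "hide my identity":         ["network"],
-- }
--
-- def _recommend_task_from_text(user_text: str) -> str | None:
--     if not user_text:
--         return None
--
--     words = set(w for w in user_text.lower().replace("/", " ").split() if len(w) > 2)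
--     best_task = None
--     best_score = 0
--
--     for task in _RECOMMENDATIONS:
--         task_words = set(task.lower().replace("/", " ").split())
--         score = len(words.intersection(task_words))
--         if score > best_score:
--             best_score = score
--             best_task = task
--
--     return best_task if best_score > 0 else None
-- ===== SOURCE B (Python) =====
-- _RECOMMENDATIONS = {
--     "scan a network":           ["scanner", "port-scanner"],
--     "find subdomains":          ["recon"],
--     "scan for vulnerabilities": ["scanner", "web"],
--     "crack passwords":          ["bruteforce", "credentials"],
--     "find leaked secrets":      ["credentials"],
--     "phishing campaign":        ["social-engineering"],
--     "post exploitation":        ["c2", "privesc"],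
--     "pivot through network":    ["network"],
--     "pentest active directory": ["active-directory"],
--     "pentest web application":  ["web", "scanner"],
--     "pentest cloud":            ["cloud"],
--     "pentest mobile app":       ["mobile"],
--     "reverse engineer binary":  ["reversing"],
--     "capture wifi handshake":   ["wireless"],
--     "intercept http traffic":   ["web", "network"],
--     "forensic analysis":        ["forensics"],
--     "ddos testing":             ["ddos"],
--     "create payloads":          ["payload"],
--     "find xss vulnerabilities": ["web"],
--     "brute force directories":  ["bruteforce", "web"],
--     "osint / recon a target":   ["osint", "recon"],
--     "hide my identity":         ["network"],
-- }
--
--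
-- def _norm_words(text):
--     return text.lower().replace("/", " ").split()
--
--
-- # Inverted index: task-word -> list of tasks containing it (built once).
-- _INDEX = {}
-- for _task in _RECOMMENDATIONS:
--     for _w in set(_norm_words(_task)):
--         _INDEX.setdefault(_w, []).append(_task)
--
--
-- def _recommend_task_from_text(user_text: str) -> str | None:
--     if not user_text:
--         return None
--
--     words = set(w for w in _norm_words(user_text) if len(w) > 2)
--
--     counts = {}
--     for w in words:
--         for t in _INDEX.get(w, []):
--             counts[t] = counts.get(t, 0) + 1
--
--     best_task = None
--     best_score = 0
--     for task in _RECOMMENDATIONS: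
--         c = counts.get(task, 0)
--         if c > best_score:
--             best_score = c
--             best_task = task
--
--     return best_task if best_score > 0 else None
-- ===== Notes on version B (the rewrite author's own statement) =====
-- stated objective: alternative
-- what changed: B precomputes (once, at module level) an inverted index mapping each normalised task-word to the tasks containing it, then per call tallies hit counts only for the user's words via index lookups, instead of A's per-call rescan of all 22 task phrases with a set intersection for each; the winner is chosen by the same strict-> first-winner scan in dict insertion order.
import Mathlib
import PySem

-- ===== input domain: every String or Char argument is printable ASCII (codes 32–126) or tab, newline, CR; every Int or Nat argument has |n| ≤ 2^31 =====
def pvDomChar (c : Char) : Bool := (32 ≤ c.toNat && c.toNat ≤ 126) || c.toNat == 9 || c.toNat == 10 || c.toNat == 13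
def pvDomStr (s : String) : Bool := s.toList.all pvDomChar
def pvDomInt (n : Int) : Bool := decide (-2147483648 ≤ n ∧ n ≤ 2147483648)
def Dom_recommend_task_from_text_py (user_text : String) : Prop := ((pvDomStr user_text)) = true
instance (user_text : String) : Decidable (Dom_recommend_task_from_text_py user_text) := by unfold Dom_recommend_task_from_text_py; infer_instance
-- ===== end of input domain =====

-- B replaces A's per-call rescan of all 22 task phrases (one word-set intersection each) by a
-- precomputed inverted index word → tasks, tallying per-task hits from the user's words only;
-- the winner is picked by the same strict-`>` scan in dict insertion order (objective: alternative).

-- ===== PORT A =====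
-- _RECOMMENDATIONS (module-level dict; only its keys, in insertion order, are read)
def pvRecs : PySem.Dict String (List String) := PySem.Dict.ofList [
  ("scan a network",           ["scanner", "port-scanner"]),
  ("find subdomains",          ["recon"]),
  ("scan for vulnerabilities", ["scanner", "web"]),
  ("crack passwords",          ["bruteforce", "credentials"]),
  ("find leaked secrets",      ["credentials"]),
  ("phishing campaign",        ["social-engineering"]),
  ("post exploitation",        ["c2", "privesc"]),
  ("pivot through network",    ["network"]),
  ("pentest active directory", ["active-directory"]),
  ("pentest web application",  ["web", "scanner"]),
  ("pentest cloud",            ["cloud"]),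
  ("pentest mobile app",       ["mobile"]),
  ("reverse engineer binary",  ["reversing"]),
  ("capture wifi handshake",   ["wireless"]),
  ("intercept http traffic",   ["web", "network"]),
  ("forensic analysis",        ["forensics"]),
  ("ddos testing",             ["ddos"]),
  ("create payloads",          ["payload"]),
  ("find xss vulnerabilities", ["web"]),
  ("brute force directories",  ["bruteforce", "web"]),
  ("osint / recon a target",   ["osint", "recon"]),
  ("hide my identity",         ["network"])]

def recommend_task_from_text_py (user_text : String) : Option String :=
  if user_text = "" then none
  else
    let words : PySem.Set String :=
      PySem.Set.ofList ((PySem.Str.split₀ (PySem.Str.replace (PySem.Str.lower user_text) "/" " ")).filter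
        (fun w => 2 < PySem.Str.len w))
    let r := pvRecs.keys.foldl (fun (st : Option String × Int) task =>
        let task_words : PySem.Set String :=
          PySem.Set.ofList (PySem.Str.split₀ (PySem.Str.replace (PySem.Str.lower task) "/" " "))
        let score : Int := PySem.Set.len (PySem.Set.inter words task_words)
        if score > st.2 then (some task, score) else st) (none, 0)
    if r.2 > 0 then r.1 else none

-- ===== PORT B =====
-- _norm_words
def pvNormWords (text : String) : List String :=
  PySem.Str.split₀ (PySem.Str.replace (PySem.Str.lower text) "/" " ")

-- _INDEX: inverted index word → tasks containing it, built once over _RECOMMENDATIONS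
def pvIndex : PySem.Dict String (List String) :=
  pvRecs.keys.foldl (fun d task =>
    (PySem.Set.ofList (pvNormWords task)).foldl (fun d w => d.modify w [] (· ++ [task])) d)
    PySem.Dict.empty

def recommend_task_from_text_py_alt (user_text : String) : Option String :=
  if user_text = "" then none
  else
    let words : PySem.Set String :=
      PySem.Set.ofList ((pvNormWords user_text).filter (fun w => 2 < PySem.Str.len w))
    let counts : PySem.Dict String Int :=
      words.foldl (fun c w => (pvIndex.getD w []).foldl (fun c t => c.modify t 0 (· + 1)) c)
        PySem.Dict.empty
    let r := pvRecs.keys.foldl (fun (st : Option String × Int) task =>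
        let c := counts.getD task 0
        if c > st.2 then (some task, c) else st) (none, 0)
    if r.2 > 0 then r.1 else none

-- ===== PRECONDITION & SPEC =====
def Spec_recommend_task_from_text_py (user_text : String) (out : Option String) : Prop := out = recommend_task_from_text_py_alt user_text
instance (user_text : String) (out : Option String) : Decidable (Spec_recommend_task_from_text_py user_text out) := by unfold Spec_recommend_task_from_text_py; infer_instance

-- ===== CLAIM (what is proved, stated in full; the proofs are below) =====
def Claim_equal_recommend_task_from_text_py : Prop := ∀ (user_text : String), Dom_recommend_task_from_text_py user_text → Spec_recommend_task_from_text_py user_text (recommend_task_from_text_py user_text)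

-- ===== LEMMAS AND PROOFS =====

-- the word set of a task, as both programs normalise it
def pvTaskWords (t : String) : PySem.Set String := PySem.Set.ofList (pvNormWords t)

lemma pv_filter_beq_of_nodup (w : String) (l : List String) (h : l.Nodup) :
    l.filter (fun u => u == w) = if w ∈ l then [w] else [] := by
  induction l with
  | nil => simp
  | cons x xs ih =>
    rcases List.nodup_cons.mp h with ⟨hx, hxs⟩
    by_cases hxw : x = w
    · subst hxw
      have hnil : List.filter (fun u => u == x) xs = [] := by
        apply List.filter_eq_nil_iff.mpr
        intro a ha
        simp only [beq_iff_eq]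
        exact fun h => hx (h ▸ ha)
      simp [hnil]
    · simp [hxw, ih hxs, Ne.symm hxw]

lemma pv_flatMap_ite_singleton (l : List String) (p : String → Bool) :
    (l.flatMap (fun t => if p t then [t] else [])) = l.filter p := by
  induction l with
  | nil => simp
  | cons x xs ih => by_cases hx : p x <;> simp [hx, ih]

lemma pv_nodup_tasks : pvRecs.keys.Nodup := PySem.Dict.nodup_keys_ofList _

lemma pv_index_getD (w : String) :
    pvIndex.getD w [] = pvRecs.keys.filter (fun t => decide (w ∈ pvTaskWords t)) := by
  have h1 : pvIndex = List.foldl (fun d p => d.modify p.1 [] fun x => x ++ [p.2])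
      PySem.Dict.empty
      (pvRecs.keys.flatMap (fun t => (pvTaskWords t).map (fun u => (u, t)))) := by
    simp [pvIndex, pvTaskWords, List.foldl_flatMap, List.foldl_map]
  rw [h1, PySem.Dict.getD_foldl_modify_append]
  rw [List.filter_flatMap]
  have h2 : ∀ t ∈ pvRecs.keys,
      List.filter (fun p => p.1 == w) ((pvTaskWords t).map (fun u => (u, t)))
      = if decide (w ∈ pvTaskWords t) then [(w, t)] else [] := by
    intro t _
    have hnd : (pvTaskWords t).Nodup := PySem.Set.nodup_ofList _
    rw [List.filter_map]
    have : ((pvTaskWords t).filter ((fun p => p.1 == w) ∘ (fun u => (u, t))))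
        = (pvTaskWords t).filter (fun u => u == w) := by
      simp [Function.comp_def]
    rw [this, pv_filter_beq_of_nodup w _ hnd]
    by_cases hw : w ∈ pvTaskWords t <;> simp [hw]
  rw [List.flatMap_congr h2]
  have h3 : (pvRecs.keys.flatMap (fun t => if decide (w ∈ pvTaskWords t) then [(w, t)] else []))
      = (pvRecs.keys.flatMap (fun t => if decide (w ∈ pvTaskWords t) then [t] else [])).map
          (fun t => (w, t)) := by
    rw [List.map_flatMap]
    apply List.flatMap_congr
    intro t _
    by_cases hw : w ∈ pvTaskWords t <;> simp [hw]
  rw [h3, pv_flatMap_ite_singleton]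
  simp

lemma pv_count_index (w t : String) (ht : t ∈ pvRecs.keys) :
    (pvIndex.getD w []).count t = if w ∈ pvTaskWords t then 1 else 0 := by
  rw [pv_index_getD]
  by_cases hw : w ∈ pvTaskWords t
  · rw [List.count_filter (by simp [hw])]
    simp only [hw, if_true]
    exact List.count_eq_one_of_mem pv_nodup_tasks ht
  · rw [List.count_eq_zero_of_not_mem, if_neg hw]
    intro hmem
    have := List.of_mem_filter hmem
    simp [hw] at this

lemma pv_counts_getD (W : List String) (c : PySem.Dict String Int) (t : String)
    (ht : t ∈ pvRecs.keys) :
    (W.foldl (fun c w => (pvIndex.getD w []).foldl (fun c t => c.modify t 0 (· + 1)) c) c).getD t 0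
    = c.getD t 0 + ((W.filter (fun w => (pvTaskWords t).contains w)).length : Int) := by
  induction W generalizing c with
  | nil => simp
  | cons w ws ih =>
    rw [List.foldl_cons, ih]
    rw [PySem.Dict.getD_foldl_modify_add_one]
    rw [pv_count_index w t ht]
    by_cases hw : w ∈ pvTaskWords t
    · simp [hw]
      ring
    · simp [hw]

-- ===== VERDICT (by name: the statement is the Claim_ definition above) =====
theorem recommend_task_from_text_py_spec : Claim_equal_recommend_task_from_text_py := by
  intro user_text _
  unfold Spec_recommend_task_from_text_py recommend_task_from_text_py recommend_task_from_text_py_alt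
  by_cases hs : user_text = ""
  · rw [if_pos hs, if_pos hs]
  · rw [if_neg hs, if_neg hs]
    dsimp only
    have hfold : pvRecs.keys.foldl (fun (st : Option String × Int) task =>
        let task_words : PySem.Set String :=
          PySem.Set.ofList (PySem.Str.split₀ (PySem.Str.replace (PySem.Str.lower task) "/" " "))
        let score : Int := PySem.Set.len (PySem.Set.inter
          (PySem.Set.ofList ((PySem.Str.split₀ (PySem.Str.replace (PySem.Str.lower user_text) "/" " ")).filter
            (fun w => 2 < PySem.Str.len w))) task_words)
        if score > st.2 then (some task, score) else st) (none, 0)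
      = pvRecs.keys.foldl (fun (st : Option String × Int) task =>
        let c := ((PySem.Set.ofList ((pvNormWords user_text).filter (fun w => 2 < PySem.Str.len w))).foldl
            (fun c w => (pvIndex.getD w []).foldl (fun c t => c.modify t 0 (· + 1)) c)
            PySem.Dict.empty).getD task 0
        if c > st.2 then (some task, c) else st) (none, 0) := by
      apply PySem.List.foldl_congr_mem
      intro acc task htask
      dsimp only
      have hc : ((PySem.Set.ofList ((pvNormWords user_text).filter (fun w => 2 < PySem.Str.len w))).foldl
          (fun c w => (pvIndex.getD w []).foldl (fun c t => c.modify t 0 (· + 1)) c)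
          PySem.Dict.empty).getD task 0
          = PySem.Set.len (PySem.Set.inter
            (PySem.Set.ofList ((pvNormWords user_text).filter (fun w => 2 < PySem.Str.len w)))
            (pvTaskWords task)) := by
        rw [pv_counts_getD _ _ task htask]
        simp only [PySem.Set.inter, PySem.Set.len, PySem.Dict.getD_empty, zero_add]
      simp only [pvNormWords, pvTaskWords] at hc ⊢
      rw [hc]
    simp only [pvNormWords] at hfold
    rw [hfold]
    simp only [pvNormWords]
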